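-- pv_equiv track=rewrite | github.com/blhk0532/nordic-api | fix_booleans.py | replace_booleans
-- ===== SOURCE A (Python) =====
-- def replace_booleans(line: str) -> str:
--     # Replace numeric booleans with PostgreSQL boolean literals.
--     # We'll replace only when not inside quotes.
--     # Simple state machine
--     result = []
--     in_string = False
--     quote_char = None
--     i = 0
--     while i < len(line):
--         ch = line[i]
--         if ch == "'" and (i == 0 or line[i-1] != '\\'):
--             if not in_string:
--                 in_string = True
--                 quote_char = "'"
--             elif quote_char == "'":
--                 in_string = False
--         elif ch == '"' and (i == 0 or line[i-1] != '\\'):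
--             if not in_string:
--                 in_string = True
--                 quote_char = '"'
--             elif quote_char == '"':
--                 in_string = False
--         if not in_string:
--             # Check for pattern , 1, or , 0,
--             if ch == ',' and i+2 < len(line):
--                 # Look ahead for space and digit
--                 j = i+1
--                 while j < len(line) and line[j] == ' ':
--                     j += 1
--                 if j < len(line) and line[j] in ('0','1'):
--                     # ensure next char is comma or space then comma
--                     k = j+1
--                     while k < len(line) and line[k] == ' ':
--                         k += 1
--                     if k < len(line) and line[k] == ',':
--                         # replace digit with TRUE/FALSE
--                         if line[j] == '1':
--                             replacement = 'TRUE'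
--                         else:
--                             replacement = 'FALSE'
--                         # replace from i+1 to k (exclusive) with replacement
--                         result.append(',')
--                         result.append(' ')
--                         result.append(replacement)
--                         i = k  # skip digit and spaces up to comma
--                         continue
--         result.append(ch)
--         i += 1
--     return ''.join(result)
-- ===== SOURCE B (Python) =====
-- def replace_booleans(line: str) -> str:
--     # Replace numeric booleans with PostgreSQL literals outside quotes.
--     # Recursive-descent style scan: quoted spans are consumed in bulk by a
--     # helper (no in_string flag), and the ", 0/1 ," pattern by a match helper.
--     out = []
--     i = 0
--     n = len(line)
--     while i < n:
--         c = line[i]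
--         if c in ("'", '"') and (i == 0 or line[i-1] != '\\'):
--             j = _string_end(line, i + 1, c)   # index just past the closing quote
--             out.append(line[i:j])
--             i = j
--             continue
--         if c == ',':
--             m = _match01(line, i + 1)
--             if m is not None:
--                 d, k = m                       # k = index of the trailing comma
--                 out.append(', TRUE' if d == '1' else ', FALSE')
--                 i = k                          # re-scan from the trailing comma
--                 continue
--         out.append(c)
--         i += 1
--     return ''.join(out)
--
--
-- def _string_end(line, i, q):
--     # scan past the quoted literal opened by q just before position i
--     while i < len(line):
--         if line[i] == q and line[i-1] != '\\':
--             return i + 1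
--         i += 1
--     return i
--
--
-- def _match01(line, i):
--     # match ' '* [01] ' '* ',' starting at i; return (digit, comma index) or None
--     n = len(line)
--     while i < n and line[i] == ' ':
--         i += 1
--     if i < n and line[i] in ('0', '1'):
--         d = line[i]
--         i += 1
--         while i < n and line[i] == ' ':
--             i += 1
--         if i < n and line[i] == ',':
--             return d, i
--     return None
-- ===== Notes on version B (the rewrite author's own statement) =====
-- stated objective: alternative
-- what changed: Replaces A's char-by-char state machine (in_string flag and quote_char toggled on every character) by a recursive-descent scan that consumes each quoted literal in bulk with a _string_end helper and recognises the comma/spaces/zero-or-one/spaces/comma pattern with a separate _match01 helper, appending whole spans instead of single characters.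
import Mathlib
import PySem

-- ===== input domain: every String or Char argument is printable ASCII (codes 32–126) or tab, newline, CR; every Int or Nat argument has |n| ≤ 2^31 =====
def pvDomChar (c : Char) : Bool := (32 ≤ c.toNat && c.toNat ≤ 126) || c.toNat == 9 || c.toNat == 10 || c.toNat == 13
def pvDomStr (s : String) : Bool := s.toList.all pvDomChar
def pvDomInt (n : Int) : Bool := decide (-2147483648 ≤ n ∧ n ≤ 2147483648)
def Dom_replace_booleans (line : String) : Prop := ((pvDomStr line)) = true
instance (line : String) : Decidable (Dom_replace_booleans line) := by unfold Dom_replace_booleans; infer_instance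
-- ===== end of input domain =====

-- B replaces A's char-by-char in_string flag machine by a recursive-descent scan that
-- consumes quoted spans in bulk and matches the ", 0/1 ," pattern with a helper (objective: alternative).

-- ===== PORT A =====
-- A's inner `while j < len(line) and line[j] == ' '` loops
def pvSkipA (cs : List Char) (j : Nat) : Nat :=
  if _h : j < cs.length then
    if cs.getD j ' ' = ' ' then pvSkipA cs (j + 1) else j
  else j
termination_by cs.length - j

theorem pvSkipA_ge (cs : List Char) (j : Nat) : j ≤ pvSkipA cs j := by
  rw [pvSkipA]
  split
  · split
    · have := pvSkipA_ge cs (j + 1); omega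
    · exact Nat.le_refl j
  · exact Nat.le_refl j
termination_by cs.length - j

-- A's main while loop: index i, in_string flag, quote_char, accumulated output
def pvALoop (cs : List Char) (i : Nat) (inStr : Bool) (qc : Option Char) (acc : List Char) : List Char :=
  if _h : i < cs.length then
    let ch := cs.getD i ' '
    let st : Bool × Option Char :=
      if ch = '\'' ∧ (i = 0 ∨ cs.getD (i - 1) ' ' ≠ '\\') then
        if inStr = false then (true, some '\'')
        else if qc = some '\'' then (false, qc) else (inStr, qc)
      else if ch = '"' ∧ (i = 0 ∨ cs.getD (i - 1) ' ' ≠ '\\') then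
        if inStr = false then (true, some '"')
        else if qc = some '"' then (false, qc) else (inStr, qc)
      else (inStr, qc)
    if st.1 = false then
      if ch = ',' ∧ i + 2 < cs.length then
        let j := pvSkipA cs (i + 1)
        if j < cs.length ∧ (cs.getD j ' ' = '0' ∨ cs.getD j ' ' = '1') then
          let k := pvSkipA cs (j + 1)
          if k < cs.length ∧ cs.getD k ' ' = ',' then
            let repl : String := if cs.getD j ' ' = '1' then "TRUE" else "FALSE"
            pvALoop cs k st.1 st.2 (acc ++ [','] ++ [' '] ++ repl.toList)
          else pvALoop cs (i + 1) st.1 st.2 (acc ++ [ch])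
        else pvALoop cs (i + 1) st.1 st.2 (acc ++ [ch])
      else pvALoop cs (i + 1) st.1 st.2 (acc ++ [ch])
    else pvALoop cs (i + 1) st.1 st.2 (acc ++ [ch])
  else acc
termination_by cs.length - i
decreasing_by
  · have h1 := pvSkipA_ge cs (i + 1)
    have h2 := pvSkipA_ge cs (pvSkipA cs (i + 1) + 1)
    omega
  all_goals omega

-- ''.join(result) over the char pieces
def replace_booleans (line : String) : String :=
  String.ofList (pvALoop line.toList 0 false none [])

-- ===== PORT B =====
-- B's _string_end: scan past the quoted literal opened by q just before position i
def pvStrEnd (cs : List Char) (i : Nat) (q : Char) : Nat :=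
  if _h : i < cs.length then
    if cs.getD i ' ' = q ∧ cs.getD (i - 1) ' ' ≠ '\\' then i + 1
    else pvStrEnd cs (i + 1) q
  else i
termination_by cs.length - i

theorem pvStrEnd_ge (cs : List Char) (i : Nat) (q : Char) : i ≤ pvStrEnd cs i q := by
  rw [pvStrEnd]
  split
  · split
    · omega
    · have := pvStrEnd_ge cs (i + 1) q; omega
  · exact Nat.le_refl i
termination_by cs.length - i

-- B's inline `while i < n and line[i] == ' '` loops inside _match01
def pvSkipB (cs : List Char) (i : Nat) : Nat :=
  if _h : i < cs.length then
    if cs.getD i ' ' = ' ' then pvSkipB cs (i + 1) else i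
  else i
termination_by cs.length - i

theorem pvSkipB_ge (cs : List Char) (i : Nat) : i ≤ pvSkipB cs i := by
  rw [pvSkipB]
  split
  · split
    · have := pvSkipB_ge cs (i + 1); omega
    · exact Nat.le_refl i
  · exact Nat.le_refl i
termination_by cs.length - i

-- B's _match01: match ' '* [01] ' '* ',' starting at i, returning (digit, comma index)
def pvMatch01 (cs : List Char) (i : Nat) : Option (Char × Nat) :=
  let j := pvSkipB cs i
  if j < cs.length ∧ (cs.getD j ' ' = '0' ∨ cs.getD j ' ' = '1') then
    let k := pvSkipB cs (j + 1)
    if k < cs.length ∧ cs.getD k ' ' = ',' then some (cs.getD j ' ', k) else none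
  else none

theorem pvMatch01_lt (cs : List Char) (i : Nat) (dk : Char × Nat)
    (h : pvMatch01 cs i = some dk) : i < dk.2 := by
  have h1 := pvSkipB_ge cs i
  have h2 := pvSkipB_ge cs (pvSkipB cs i + 1)
  simp only [pvMatch01] at h
  split at h
  · split at h
    · cases h; simp; omega
    · exact absurd h (by simp)
  · exact absurd h (by simp)

-- B's main while loop
def pvBLoop (cs : List Char) (i : Nat) (acc : List Char) : List Char :=
  if _h : i < cs.length then
    let c := cs.getD i ' '
    if (c = '\'' ∨ c = '"') ∧ (i = 0 ∨ cs.getD (i - 1) ' ' ≠ '\\') then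
      -- line[i:j] with 0 ≤ i ≤ j: the slice is exactly this drop/take
      let j := pvStrEnd cs (i + 1) c
      pvBLoop cs j (acc ++ (cs.drop i).take (j - i))
    else if c = ',' then
      match hm : pvMatch01 cs (i + 1) with
      | some dk => pvBLoop cs dk.2 (acc ++ (if dk.1 = '1' then ", TRUE" else ", FALSE").toList)
      | none => pvBLoop cs (i + 1) (acc ++ [c])
    else pvBLoop cs (i + 1) (acc ++ [c])
  else acc
termination_by cs.length - i
decreasing_by
  · have := pvStrEnd_ge cs (i + 1) (cs.getD i ' '); omega
  · have := pvMatch01_lt cs (i + 1) dk hm; omega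
  all_goals omega

def replace_booleans_alt (line : String) : String :=
  String.ofList (pvBLoop line.toList 0 [])

-- ===== PRECONDITION & SPEC =====
def Spec_replace_booleans (line : String) (out : String) : Prop := out = replace_booleans_alt line
instance (line : String) (out : String) : Decidable (Spec_replace_booleans line out) := by unfold Spec_replace_booleans; infer_instance

-- ===== CLAIM (what is proved, stated in full; the proofs are below) =====
def Claim_equal_replace_booleans : Prop := ∀ (line : String), Dom_replace_booleans line → Spec_replace_booleans line (replace_booleans line)

-- ===== LEMMAS AND PROOFS =====

theorem pvSkipB_eq_pvSkipA (cs : List Char) (i : Nat) : pvSkipB cs i = pvSkipA cs i := by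
  rw [pvSkipB, pvSkipA]
  split
  · split
    · exact pvSkipB_eq_pvSkipA cs (i + 1)
    · rfl
  · rfl
termination_by cs.length - i

-- characterisation of B's matcher in terms of A's skip loop
theorem pvMatch01_eq (cs : List Char) (i : Nat) :
    pvMatch01 cs i =
      (if pvSkipA cs i < cs.length ∧
            (cs.getD (pvSkipA cs i) ' ' = '0' ∨ cs.getD (pvSkipA cs i) ' ' = '1') then
        if pvSkipA cs (pvSkipA cs i + 1) < cs.length ∧
            cs.getD (pvSkipA cs (pvSkipA cs i + 1)) ' ' = ',' then
          some (cs.getD (pvSkipA cs i) ' ', pvSkipA cs (pvSkipA cs i + 1))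
        else none
      else none) := by
  unfold pvMatch01
  simp only [pvSkipB_eq_pvSkipA]

theorem pvDropCons (cs : List Char) (i : Nat) (h : i < cs.length) :
    cs.drop i = cs.getD i ' ' :: cs.drop (i + 1) := by
  rw [List.getD_eq_getElem cs ' ' h]
  exact List.drop_eq_getElem_cons h

-- the joint simulation: outside a string A's loop coincides with B's loop, and
-- inside a string A's char-by-char copying coincides with B's bulk slice copy
theorem pvSim (cs : List Char) (fuel : Nat) : ∀ i, cs.length - i ≤ fuel →
    ((∀ qc acc, pvALoop cs i false qc acc = pvBLoop cs i acc) ∧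
     (∀ q acc, 1 ≤ i → (q = '\'' ∨ q = '"') →
       pvALoop cs i true (some q) acc =
         pvBLoop cs (pvStrEnd cs i q) (acc ++ (cs.drop i).take (pvStrEnd cs i q - i)))) := by
  induction fuel with
  | zero =>
    intro i hf
    have hn : ¬ i < cs.length := by omega
    constructor
    · intro qc acc
      rw [pvALoop, pvBLoop]
      simp [hn]
    · intro q acc _ _
      rw [pvALoop, pvStrEnd, pvBLoop]
      simp [hn]
  | succ fuel ih =>
    intro i hf
    by_cases hn : i < cs.length
    · have hf1 : cs.length - (i + 1) ≤ fuel := by omega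
      constructor
      · -- L: outside a string, A's loop = B's loop
        intro qc acc
        rw [pvALoop, pvBLoop]
        simp only [dif_pos hn]
        simp only [reduceIte]
        by_cases hq : (cs.getD i ' ' = '\'' ∨ cs.getD i ' ' = '"') ∧
            (i = 0 ∨ cs.getD (i - 1) ' ' ≠ '\\')
        · -- unescaped quote: A enters string mode, B consumes the span in bulk
          have hE := pvStrEnd_ge cs (i + 1) (cs.getD i ' ')
          have hS := (ih (i + 1) hf1).2 (cs.getD i ' ') (acc ++ [cs.getD i ' '])
            (by omega) hq.1
          have hacc : acc ++ [cs.getD i ' '] ++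
                (cs.drop (i+1)).take (pvStrEnd cs (i+1) (cs.getD i ' ') - (i+1))
              = acc ++ (cs.drop i).take (pvStrEnd cs (i+1) (cs.getD i ' ') - i) := by
            rw [pvDropCons cs i hn]
            have h3 : pvStrEnd cs (i+1) (cs.getD i ' ') - i
                = (pvStrEnd cs (i+1) (cs.getD i ' ') - (i+1)) + 1 := by omega
            rw [h3, List.take_succ_cons, List.append_assoc]
            rfl
          rw [hacc] at hS
          rw [if_pos hq]
          obtain ⟨hq1, hq2⟩ := hq
          rcases hq1 with h1 | h1
          · rw [if_pos (⟨h1, hq2⟩ : cs.getD i ' ' = '\'' ∧ (i = 0 ∨ cs.getD (i - 1) ' ' ≠ '\\'))]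
            simp only []
            rw [h1] at hS ⊢
            exact hS
          · rw [if_neg (fun hx => absurd (h1.symm.trans hx.1) (by decide) :
                ¬ (cs.getD i ' ' = '\'' ∧ (i = 0 ∨ cs.getD (i - 1) ' ' ≠ '\\'))),
              if_pos (⟨h1, hq2⟩ : cs.getD i ' ' = '"' ∧ (i = 0 ∨ cs.getD (i - 1) ' ' ≠ '\\'))]
            simp only []
            rw [h1] at hS ⊢
            exact hS
        · -- not an opening quote: A's state stays (false, qc)
          have hst1 : ¬ (cs.getD i ' ' = '\'' ∧ (i = 0 ∨ cs.getD (i - 1) ' ' ≠ '\\')) := by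
            intro hc; exact hq ⟨Or.inl hc.1, hc.2⟩
          have hst2 : ¬ (cs.getD i ' ' = '"' ∧ (i = 0 ∨ cs.getD (i - 1) ' ' ≠ '\\')) := by
            intro hc; exact hq ⟨Or.inr hc.1, hc.2⟩
          rw [if_neg hst1, if_neg hst2, if_neg hq]
          simp only [reduceIte]
          by_cases hc : cs.getD i ' ' = ','
          · -- comma: align A's lookahead with B's _match01
            rw [if_pos hc]
            have hj1 := pvSkipA_ge cs (i + 1)
            have hk1 := pvSkipA_ge cs (pvSkipA cs (i + 1) + 1)
            by_cases hj : pvSkipA cs (i + 1) < cs.length ∧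
                (cs.getD (pvSkipA cs (i + 1)) ' ' = '0' ∨ cs.getD (pvSkipA cs (i + 1)) ' ' = '1')
            · by_cases hk : pvSkipA cs (pvSkipA cs (i + 1) + 1) < cs.length ∧
                  cs.getD (pvSkipA cs (pvSkipA cs (i + 1) + 1)) ' ' = ','
              · -- full match: both replace and continue at the trailing comma
                have h2 : i + 2 < cs.length := by omega
                have hfk : cs.length - pvSkipA cs (pvSkipA cs (i + 1) + 1) ≤ fuel := by omega
                have hmatch : pvMatch01 cs (i + 1) =
                    some (cs.getD (pvSkipA cs (i + 1)) ' ', pvSkipA cs (pvSkipA cs (i + 1) + 1)) := by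
                  rw [pvMatch01_eq, if_pos hj, if_pos hk]
                rw [if_pos (⟨hc, h2⟩ : cs.getD i ' ' = ',' ∧ i + 2 < cs.length),
                  if_pos hj, if_pos hk]
                have hL := (ih (pvSkipA cs (pvSkipA cs (i + 1) + 1)) hfk).1 qc
                rcases hj.2 with hd | hd <;> rw [hd]
                · rw [if_neg (by decide : ¬(('0' : Char) = '1'))]
                  split
                  · rename_i dk hm'
                    rw [hmatch, hd] at hm'
                    have hdk := Option.some.inj hm'
                    subst hdk
                    simp only []
                    rw [List.append_assoc, List.append_assoc,
                      (by decide : (([','] ++ ([' '] ++ "FALSE".toList)) : List Char) = ", FALSE".toList)]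
                    exact hL (acc ++ ", FALSE".toList)
                  · rename_i hm'
                    rw [hmatch] at hm'
                    exact absurd hm' (by simp)
                · rw [if_pos (rfl : ('1' : Char) = '1')]
                  split
                  · rename_i dk hm'
                    rw [hmatch, hd] at hm'
                    have hdk := Option.some.inj hm'
                    subst hdk
                    simp only []
                    rw [List.append_assoc, List.append_assoc,
                      (by decide : (([','] ++ ([' '] ++ "TRUE".toList)) : List Char) = ", TRUE".toList)]
                    exact hL (acc ++ ", TRUE".toList)
                  · rename_i hm'
                    rw [hmatch] at hm'
                    exact absurd hm' (by simp)
              · -- digit found but no trailing comma: B's matcher fails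
                have hmatch : pvMatch01 cs (i + 1) = none := by
                  rw [pvMatch01_eq, if_pos hj, if_neg hk]
                by_cases h2 : i + 2 < cs.length
                · rw [if_pos (⟨hc, h2⟩ : cs.getD i ' ' = ',' ∧ i + 2 < cs.length),
                    if_pos hj, if_neg hk, hc]
                  split
                  · rename_i dk hm'
                    rw [hmatch] at hm'
                    exact absurd hm' (by simp)
                  · exact (ih (i + 1) hf1).1 qc (acc ++ [','])
                · rw [if_neg (fun hx => h2 hx.2 :
                      ¬ (cs.getD i ' ' = ',' ∧ i + 2 < cs.length)), hc]
                  split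
                  · rename_i dk hm'
                    rw [hmatch] at hm'
                    exact absurd hm' (by simp)
                  · exact (ih (i + 1) hf1).1 qc (acc ++ [','])
            · -- no digit after the spaces: B's matcher fails
              have hmatch : pvMatch01 cs (i + 1) = none := by
                rw [pvMatch01_eq, if_neg hj]
              by_cases h2 : i + 2 < cs.length
              · rw [if_pos (⟨hc, h2⟩ : cs.getD i ' ' = ',' ∧ i + 2 < cs.length),
                  if_neg hj, hc]
                split
                · rename_i dk hm'
                  rw [hmatch] at hm'
                  exact absurd hm' (by simp)
                · exact (ih (i + 1) hf1).1 qc (acc ++ [','])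
              · rw [if_neg (fun hx => h2 hx.2 :
                    ¬ (cs.getD i ' ' = ',' ∧ i + 2 < cs.length)), hc]
                split
                · rename_i dk hm'
                  rw [hmatch] at hm'
                  exact absurd hm' (by simp)
                · exact (ih (i + 1) hf1).1 qc (acc ++ [','])
          · -- ordinary character
            rw [if_neg hc, if_neg (fun hx => hc hx.1 :
              ¬ (cs.getD i ' ' = ',' ∧ i + 2 < cs.length))]
            exact (ih (i + 1) hf1).1 qc (acc ++ [cs.getD i ' '])
      · -- S: inside a string opened by q, A copies char-by-char, B copied the slice
        intro q acc hi1 hqq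
        rw [pvALoop]
        simp only [dif_pos hn]
        by_cases hcq : cs.getD i ' ' = q ∧ cs.getD (i - 1) ' ' ≠ '\\'
        · -- closing quote: both leave string mode at i+1
          have hE : pvStrEnd cs i q = i + 1 := by
            rw [pvStrEnd]
            rw [dif_pos hn, if_pos hcq]
          have htake : (cs.drop i).take (pvStrEnd cs i q - i) = [cs.getD i ' '] := by
            rw [hE, pvDropCons cs i hn]
            simp
          rw [htake, hE]
          have hL := (ih (i + 1) hf1).1 (some q) (acc ++ [cs.getD i ' '])
          rcases hqq with h1 | h1 <;> subst h1 <;> simp only [reduceIte]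
          · rw [if_pos (⟨hcq.1, Or.inr hcq.2⟩ :
                cs.getD i ' ' = '\'' ∧ (i = 0 ∨ cs.getD (i - 1) ' ' ≠ '\\')),
              if_neg (by decide : ¬((true : Bool) = false)),
              if_pos (rfl : ((false : Bool), (some '\'' : Option Char)).1 = false),
              if_neg (fun hx => absurd (hcq.1.symm.trans hx.1) (by decide) :
                ¬ (cs.getD i ' ' = ',' ∧ i + 2 < cs.length))]
            exact hL
          · rw [if_neg (fun hx => absurd (hcq.1.symm.trans hx.1) (by decide) :
                ¬ (cs.getD i ' ' = '\'' ∧ (i = 0 ∨ cs.getD (i - 1) ' ' ≠ '\\'))),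
              if_pos (⟨hcq.1, Or.inr hcq.2⟩ :
                cs.getD i ' ' = '"' ∧ (i = 0 ∨ cs.getD (i - 1) ' ' ≠ '\\')),
              if_neg (by decide : ¬((true : Bool) = false)),
              if_pos (rfl : ((false : Bool), (some '"' : Option Char)).1 = false),
              if_neg (fun hx => absurd (hcq.1.symm.trans hx.1) (by decide) :
                ¬ (cs.getD i ' ' = ',' ∧ i + 2 < cs.length))]
            exact hL
        · -- any other char: stay in string mode
          have hE : pvStrEnd cs i q = pvStrEnd cs (i + 1) q := by
            rw [pvStrEnd]
            rw [dif_pos hn, if_neg hcq]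
          have hE1 := pvStrEnd_ge cs (i + 1) q
          have hS := (ih (i + 1) hf1).2 q (acc ++ [cs.getD i ' ']) (by omega) hqq
          have hacc : acc ++ [cs.getD i ' '] ++
                (cs.drop (i+1)).take (pvStrEnd cs (i+1) q - (i+1))
              = acc ++ (cs.drop i).take (pvStrEnd cs i q - i) := by
            rw [hE, pvDropCons cs i hn]
            have h3 : pvStrEnd cs (i+1) q - i = (pvStrEnd cs (i+1) q - (i+1)) + 1 := by omega
            rw [h3, List.take_succ_cons, List.append_assoc]
            rfl
          rw [hacc] at hS
          rw [hE] at hS ⊢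
          rcases hqq with h1 | h1 <;> subst h1 <;> simp only [reduceIte]
          · -- q = '\''
            by_cases hc1 : cs.getD i ' ' = '\''
            · rw [if_neg (fun hx => hcq ⟨hx.1, hx.2.resolve_left (by omega)⟩ :
                  ¬ (cs.getD i ' ' = '\'' ∧ (i = 0 ∨ cs.getD (i - 1) ' ' ≠ '\\'))),
                if_neg (fun hx => absurd (hc1.symm.trans hx.1) (by decide) :
                  ¬ (cs.getD i ' ' = '"' ∧ (i = 0 ∨ cs.getD (i - 1) ' ' ≠ '\\'))),
                if_neg (by decide : ¬(((true : Bool), (some '\'' : Option Char)).1 = false))]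
              exact hS
            · by_cases hc2 : cs.getD i ' ' = '"' ∧ (i = 0 ∨ cs.getD (i - 1) ' ' ≠ '\\')
              · rw [if_neg (fun hx => hc1 hx.1 :
                    ¬ (cs.getD i ' ' = '\'' ∧ (i = 0 ∨ cs.getD (i - 1) ' ' ≠ '\\'))),
                  if_pos hc2,
                  if_neg (by decide : ¬((true : Bool) = false)),
                  if_neg (by decide : ¬((some '\'' : Option Char) = some '"')),
                  if_neg (by decide : ¬(((true : Bool), (some '\'' : Option Char)).1 = false))]
                exact hS
              · rw [if_neg (fun hx => hc1 hx.1 :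
                    ¬ (cs.getD i ' ' = '\'' ∧ (i = 0 ∨ cs.getD (i - 1) ' ' ≠ '\\'))),
                  if_neg hc2,
                  if_neg (by decide : ¬(((true : Bool), (some '\'' : Option Char)).1 = false))]
                exact hS
          · -- q = '"'
            by_cases hc1 : cs.getD i ' ' = '\'' ∧ (i = 0 ∨ cs.getD (i - 1) ' ' ≠ '\\')
            · rw [if_pos hc1,
                if_neg (by decide : ¬((true : Bool) = false)),
                if_neg (by decide : ¬((some '"' : Option Char) = some '\'')),
                if_neg (by decide : ¬(((true : Bool), (some '"' : Option Char)).1 = false))]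
              exact hS
            · rw [if_neg hc1,
                if_neg (fun hx => hcq ⟨hx.1, hx.2.resolve_left (by omega)⟩ :
                  ¬ (cs.getD i ' ' = '"' ∧ (i = 0 ∨ cs.getD (i - 1) ' ' ≠ '\\'))),
                if_neg (by decide : ¬(((true : Bool), (some '"' : Option Char)).1 = false))]
              exact hS
    · have hn' : ¬ i < cs.length := hn
      constructor
      · intro qc acc
        rw [pvALoop, pvBLoop]
        simp [hn']
      · intro q acc _ _
        rw [pvALoop, pvStrEnd, pvBLoop]
        simp [hn']

-- ===== VERDICT (by name: the statement is the Claim_ definition above) =====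
theorem replace_booleans_spec : Claim_equal_replace_booleans := by
  intro line _
  unfold Spec_replace_booleans replace_booleans replace_booleans_alt
  exact congrArg String.ofList
    ((pvSim line.toList line.toList.length 0 (by omega)).1 none [])
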